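-- pv_equiv track=rewrite | github.com/mr-brandontran/vanity-plate-finder | generator.py | rank_plates
-- ===== SOURCE A (Python) =====
-- def rank_plates(plate_list, original_word):
--     """Scores plates based on desirability. Lower score = better rank."""
--     ranked_results = []
--
--     for plate in plate_list:
--         score = 0
--
--         # Rule 1: The Character Limit Check (Auto-fail if over 7)
--         if len(plate) > 7 or len(plate) < 2:
--             continue
--
--         # Rule 2: Clean Plate Bonus
--         # Plates with zero numbers are highly desirable
--         numbers_in_plate = sum(c.isdigit() for c in plate)
--         score += (numbers_in_plate * 10) # Heavy penalty for numbers
--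
--         # Rule 3: Purity Score
--         # How many substitutions were made? Closer to the original = better
--         changes = sum(1 for a, b in zip(plate, original_word) if a != b)
--         score += (changes * 5)
--
--         ranked_results.append({
--             "plate": plate,
--             "score": score
--         })
--
--     # Sort the list by score (lowest to highest)
--     ranked_results.sort(key=lambda x: x['score'])
--
--     return [item['plate'] for item in ranked_results]
-- ===== SOURCE B (Python) =====
-- def rank_plates(plate_list, original_word):
--     """Scores plates based on desirability. Lower score = better rank."""
--
--     def score(plate):
--         digits = 0
--         changes = 0
--         for i, c in enumerate(plate):
--             if c.isdigit():
--                 digits += 1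
--             if i < len(original_word) and c != original_word[i]:
--                 changes += 1
--         return 10 * digits + 5 * changes
--
--     survivors = [(p, score(p)) for p in plate_list if 2 <= len(p) <= 7]
--     # Max possible score is 7*10 + 7*5 = 105.  Emit plates score by score,
--     # ascending: a stable distribution by repeated selection, no sort at all.
--     return [p for s in range(106) for p, sc in survivors if sc == s]
-- ===== Notes on version B (the rewrite author's own statement) =====
-- stated objective: alternative
-- what changed: Replaces A's collect-scored-dicts-then-comparison-sort with a sort-free distribution: plates surviving the length filter are scored once (in a single combined digit/mismatch counting loop instead of two generator sums), and the output is produced by selecting, for each possible score 0..105 in ascending order, the survivors with exactly that score, which reproduces the stable ascending order without any sort.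
import Mathlib
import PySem

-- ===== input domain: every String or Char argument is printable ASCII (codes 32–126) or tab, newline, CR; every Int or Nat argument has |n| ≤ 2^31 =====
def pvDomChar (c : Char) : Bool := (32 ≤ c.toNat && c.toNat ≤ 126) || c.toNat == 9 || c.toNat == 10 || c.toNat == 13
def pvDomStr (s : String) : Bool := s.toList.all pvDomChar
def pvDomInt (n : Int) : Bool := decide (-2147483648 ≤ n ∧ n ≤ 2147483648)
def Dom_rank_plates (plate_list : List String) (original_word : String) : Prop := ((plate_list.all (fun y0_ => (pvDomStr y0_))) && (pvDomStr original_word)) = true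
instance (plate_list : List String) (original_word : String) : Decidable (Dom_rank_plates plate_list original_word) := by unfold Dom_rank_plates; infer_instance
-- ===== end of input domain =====

-- B replaces A's comparison sort of scored plates by a sort-free distribution: for each score 0..105 ascending it re-scans the list and emits the plates with that score; same output order.


-- ===== PORT A =====
def rank_plates (plate_list : List String) (original_word : String) : List String :=
  let ranked_results : List (String × Nat) :=
    plate_list.foldl (fun acc plate =>
      if PySem.Str.len plate > 7 || PySem.Str.len plate < 2 then acc
      else
        let numbers_in_plate : Nat :=
          (plate.toList.map (fun c => if PySem.Chars.isdigit c then 1 else 0)).sum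
        let score1 : Nat := numbers_in_plate * 10
        let changes : Nat :=
          ((plate.toList.zip original_word.toList).map (fun ab => if ab.1 ≠ ab.2 then 1 else 0)).sum
        let score : Nat := score1 + changes * 5
        acc ++ [(plate, score)]) []
  (PySem.List.sorted ranked_results (fun x => x.2) false).map (fun item => item.1)

-- ===== PORT B =====
/-- B's `score` helper: one pass over the plate's characters, counting the digit
penalty and (while the original word still has a character at that position) the
mismatch penalty together. -/
def pvScoreB : List Char → List Char → Nat
  | [], _ => 0
  | c :: cs, [] => (if PySem.Chars.isdigit c then 10 else 0) + pvScoreB cs []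
  | c :: cs, w :: ws =>
      (if PySem.Chars.isdigit c then 10 else 0) + (if c ≠ w then 5 else 0) + pvScoreB cs ws

def rank_plates_alt (plate_list : List String) (original_word : String) : List String :=
  let survivors : List (String × Nat) :=
    (plate_list.filter (fun p =>
        decide (2 ≤ PySem.Str.len p) && decide (PySem.Str.len p ≤ 7))).map
      (fun p => (p, pvScoreB p.toList original_word.toList))
  (List.range 106).flatMap (fun s =>
    (survivors.filter (fun x => x.2 == s)).map (fun x => x.1))

-- ===== PRECONDITION & SPEC =====
def Spec_rank_plates (plate_list : List String) (original_word : String) (out : List String) : Prop := out = rank_plates_alt plate_list original_word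
instance (plate_list : List String) (original_word : String) (out : List String) : Decidable (Spec_rank_plates plate_list original_word out) := by unfold Spec_rank_plates; infer_instance

-- ===== CLAIM (what is proved, stated in full; the proofs are below) =====
def Claim_equal_rank_plates : Prop := ∀ (plate_list : List String) (original_word : String), Dom_rank_plates plate_list original_word → Spec_rank_plates plate_list original_word (rank_plates plate_list original_word)

-- ===== LEMMAS AND PROOFS =====

/-- plates that survive A's length filter -/
def pvGood (p : String) : Bool := !(PySem.Str.len p > 7 || PySem.Str.len p < 2)

/-- the score as A computes it -/
def pvScore (w p : String) : Nat :=
  (p.toList.map (fun c => if PySem.Chars.isdigit c then 1 else 0)).sum * 10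
  + ((p.toList.zip w.toList).map (fun ab => if ab.1 ≠ ab.2 then 1 else 0)).sum * 5

/-- bucket decomposition of a list of scored items -/
def pvF (N : Nat) (xs : List (String × Nat)) : List (String × Nat) :=
  (List.range N).flatMap (fun s => xs.filter (fun x => x.2 == s))

theorem pvScoreB_eq (cs ws : List Char) :
    pvScoreB cs ws
      = (cs.map (fun c => if PySem.Chars.isdigit c then 1 else 0)).sum * 10
        + ((cs.zip ws).map (fun ab => if ab.1 ≠ ab.2 then 1 else 0)).sum * 5 := by
  induction cs generalizing ws with
  | nil => simp [pvScoreB]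
  | cons c cs ih =>
    cases ws with
    | nil =>
      have h0 := ih []
      simp only [List.zip_nil_right, List.map_nil, List.sum_nil, Nat.zero_mul,
        Nat.add_zero] at h0 ⊢
      simp only [pvScoreB, h0, List.map_cons, List.sum_cons]
      split <;> omega
    | cons w ws =>
      simp only [pvScoreB, ih, List.map_cons, List.sum_cons, List.zip_cons_cons]
      split <;> split <;> omega

theorem pvDigits_le (p : List Char) :
    (p.map (fun c => if PySem.Chars.isdigit c then 1 else 0)).sum ≤ p.length := by
  induction p with
  | nil => simp
  | cons x t ih => simp only [List.map_cons, List.sum_cons, List.length_cons]; split <;> omega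

theorem pvChanges_le (l : List (Char × Char)) :
    (l.map (fun ab => if ab.1 ≠ ab.2 then 1 else 0)).sum ≤ l.length := by
  induction l with
  | nil => simp
  | cons x t ih => simp only [List.map_cons, List.sum_cons, List.length_cons]; split <;> omega

theorem pvScore_lt (w p : String) (h : pvGood p = true) : pvScore w p < 106 := by
  have hlen : p.toList.length ≤ 7 := by
    simp [pvGood, PySem.Str.len] at h
    have : p.toList.length = p.length := rfl
    omega
  have h1 := pvDigits_le p.toList
  have h2 := pvChanges_le (p.toList.zip w.toList)
  have h3 : (p.toList.zip w.toList).length ≤ p.toList.length := by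
    simp [List.length_zip]
  unfold pvScore
  omega

theorem pvFoldA (w : String) (l : List String) (acc : List (String × Nat)) :
    l.foldl (fun acc plate =>
      if PySem.Str.len plate > 7 || PySem.Str.len plate < 2 then acc
      else acc ++ [(plate, ((plate.toList.map (fun c => if PySem.Chars.isdigit c then 1 else 0)).sum) * 10
        + ((plate.toList.zip w.toList).map (fun ab => if ab.1 ≠ ab.2 then 1 else 0)).sum * 5)]) acc
    = acc ++ (l.filter pvGood).map (fun p => (p, pvScore w p)) := by
  induction l generalizing acc with
  | nil => simp
  | cons x t ih =>
    simp only [List.foldl_cons, List.filter_cons]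
    cases hx : (decide (PySem.Str.len x > 7) || decide (PySem.Str.len x < 2)) with
    | true =>
      have hg : pvGood x = false := by unfold pvGood; rw [hx]; rfl
      simp only [if_true, hg, Bool.false_eq_true, if_false]
      exact ih acc
    | false =>
      have hg : pvGood x = true := by unfold pvGood; rw [hx]; rfl
      simp only [Bool.false_eq_true, if_false, hg, if_true]
      rw [ih]
      simp only [List.map_cons, List.append_assoc, List.singleton_append]
      rfl

theorem pvInsertBySplit {α : Type} (before : α → α → Bool) (x : α) (P Q : List α)
    (hP : ∀ y ∈ P, before x y = false) (hQ : ∀ y ∈ Q, before x y = true) :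
    PySem.List.insertBy before x (P ++ Q) = P ++ x :: Q := by
  induction P with
  | nil =>
    cases Q with
    | nil => simp [PySem.List.insertBy]
    | cons q qs => simp [PySem.List.insertBy, hQ q (by simp)]
  | cons p ps ih =>
    have hp : before x p = false := hP p (by simp)
    simp only [List.cons_append, PySem.List.insertBy, hp]
    simp only [Bool.false_eq_true, if_false]
    rw [ih (fun y hy => hP y (by simp [hy]))]

theorem pvSortedBuckets (N : Nat) (xs : List (String × Nat)) (h : ∀ x ∈ xs, x.2 < N) :
    PySem.List.sorted xs (fun x => x.2) false = pvF N xs := by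
  induction xs using List.reverseRecOn with
  | nil => simp [pvF, PySem.List.sorted_eq_foldl_insertBy]
  | append_singleton ys x ih =>
    have hys : ∀ y ∈ ys, y.2 < N := fun y hy => h y (by simp [hy])
    have hx : x.2 < N := h x (by simp)
    rw [PySem.List.sorted_eq_foldl_insertBy, List.foldl_append, List.foldl_cons, List.foldl_nil,
        ← PySem.List.sorted_eq_foldl_insertBy, ih hys]
    obtain ⟨m, hm⟩ : ∃ m, N = (x.2 + 1) + m := ⟨N - (x.2 + 1), by omega⟩
    subst hm
    unfold pvF
    rw [List.range_add]
    simp only [List.flatMap_append, List.flatMap_map]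
    set P := (List.range (x.2 + 1)).flatMap (fun s => ys.filter (fun y => y.2 == s)) with hPdef
    set Q := (List.range m).flatMap (fun j => ys.filter (fun y => y.2 == x.2 + 1 + j)) with hQdef
    have hstep : PySem.List.insertBy (fun a b : String × Nat => decide (a.2 < b.2)) x (P ++ Q) = P ++ x :: Q := by
      apply pvInsertBySplit
      · intro y hy
        simp only [hPdef, List.mem_flatMap, List.mem_range, List.mem_filter] at hy
        obtain ⟨s, hs, _, hys2⟩ := hy
        simp only [beq_iff_eq] at hys2
        simp [hys2]; omega
      · intro y hy
        simp only [hQdef, List.mem_flatMap, List.mem_range, List.mem_filter] at hy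
        obtain ⟨j, hj, _, hys2⟩ := hy
        simp only [beq_iff_eq] at hys2
        simp [hys2]; omega
    rw [hstep]
    have hPx : (List.range (x.2 + 1)).flatMap (fun s => (ys ++ [x]).filter (fun y => y.2 == s)) = P ++ [x] := by
      have hfun : ∀ s ∈ List.range (x.2 + 1),
          ((ys ++ [x]).filter (fun y => y.2 == s))
            = (ys.filter (fun y => y.2 == s)) ++ (if s = x.2 then [x] else []) := by
        intro s _
        rw [List.filter_append]
        by_cases hsx : s = x.2
        · subst hsx; simp
        · have : (x.2 == s) = false := by simp [Ne.symm hsx]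
          simp [hsx, this]
      rw [List.flatMap_congr hfun, List.range_succ, List.flatMap_append]
      have h1 : (List.range x.2).flatMap
          (fun s => (ys.filter (fun y => y.2 == s)) ++ (if s = x.2 then [x] else []))
          = (List.range x.2).flatMap (fun s => ys.filter (fun y => y.2 == s)) := by
        apply List.flatMap_congr
        intro s hs
        simp only [List.mem_range] at hs
        have : s ≠ x.2 := by omega
        simp [this]
      rw [h1]
      simp [hPdef, List.range_succ, List.flatMap_append]
    have hQx : (List.range m).flatMap (fun j => (ys ++ [x]).filter (fun y => y.2 == x.2 + 1 + j)) = Q := by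
      rw [hQdef]
      apply List.flatMap_congr
      intro j _
      rw [List.filter_append]
      have : ((x.2 : Nat) == x.2 + 1 + j) = false := by simp; omega
      simp [this]
    rw [hPx, hQx]
    simp

theorem pvScoreB_spec (w p : String) : pvScoreB p.toList w.toList = pvScore w p := by
  rw [pvScoreB_eq]; rfl

theorem pvGood_eq (p : String) :
    (decide (2 ≤ PySem.Str.len p) && decide (PySem.Str.len p ≤ 7)) = pvGood p := by
  simp only [pvGood, Bool.not_or, ← decide_not]
  have e1 : decide (¬ PySem.Str.len p > 7) = decide (PySem.Str.len p ≤ 7) := by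
    rw [decide_eq_decide]; omega
  have e2 : decide (¬ PySem.Str.len p < 2) = decide (2 ≤ PySem.Str.len p) := by
    rw [decide_eq_decide]; omega
  rw [e1, e2, Bool.and_comm]

-- ===== VERDICT (by name: the statement is the Claim_ definition above) =====
theorem rank_plates_spec : Claim_equal_rank_plates := by
  intro plate_list original_word _
  show rank_plates plate_list original_word = rank_plates_alt plate_list original_word
  simp only [rank_plates, rank_plates_alt]
  rw [pvFoldA original_word plate_list []]
  set scored := (plate_list.filter pvGood).map (fun p => (p, pvScore original_word p)) with hscored
  have hbound : ∀ x ∈ scored, x.2 < 106 := by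
    intro x hx
    simp only [hscored, List.mem_map, List.mem_filter] at hx
    obtain ⟨p, ⟨_, hg⟩, rfl⟩ := hx
    exact pvScore_lt original_word p hg
  have hsurv : (plate_list.filter (fun p =>
        decide (2 ≤ PySem.Str.len p) && decide (PySem.Str.len p ≤ 7))).map
      (fun p => (p, pvScoreB p.toList original_word.toList)) = scored := by
    rw [hscored, List.filter_congr (fun p _ => pvGood_eq p)]
    exact List.map_congr_left (fun p _ => by rw [pvScoreB_spec])
  rw [List.nil_append, pvSortedBuckets 106 scored hbound, hsurv]
  unfold pvF
  rw [List.map_flatMap]
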